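-- pv_equiv track=rewrite | github.com/Dalcoin/PMOD | pmod/ioparse.py | __dup_check__
-- ===== SOURCE A (Python) =====
-- def __dup_check__(array):
--     '''If there is a duplicate in array-like object, True is returned, else False'''
--     s = set()
--     for i in array:
--         if i in s:
--             return True
--         else:
--             s.add(i)
--     return False
-- ===== SOURCE B (Python) =====
-- def __dup_check__(array):
--     '''If there is a duplicate in array-like object, True is returned, else False'''
--     seq = list(array)
--     return len(set(seq)) != len(seq)
-- ===== Notes on version B (the rewrite author's own statement) =====
-- stated objective: idiomatic
-- what changed: Replaces the explicit loop with a running membership set and early return by a single cardinality comparison len(set(seq)) != len(seq) over the materialized input.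
import Mathlib
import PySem

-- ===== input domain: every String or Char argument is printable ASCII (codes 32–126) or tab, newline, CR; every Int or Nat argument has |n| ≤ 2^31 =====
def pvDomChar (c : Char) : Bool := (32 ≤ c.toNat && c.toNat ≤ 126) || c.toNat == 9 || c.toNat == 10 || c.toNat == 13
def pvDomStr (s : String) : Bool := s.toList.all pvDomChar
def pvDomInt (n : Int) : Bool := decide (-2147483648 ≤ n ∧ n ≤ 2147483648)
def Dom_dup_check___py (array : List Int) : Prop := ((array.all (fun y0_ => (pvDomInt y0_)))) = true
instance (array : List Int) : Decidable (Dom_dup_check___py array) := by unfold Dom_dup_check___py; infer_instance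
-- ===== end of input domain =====

-- B replaces A's early-return loop with a cardinality comparison len(set(seq)) != len(seq) (idiomatic; same cost).

-- ===== PORT A =====
-- the 'for i in array' loop with the running set s and early 'return True'
def dupCheckLoop (s : PySem.Set Int) : List Int → Bool
  | [] => false
  | i :: rest => if PySem.Set.contains s i then true else dupCheckLoop (PySem.Set.add s i) rest

def dup_check___py (array : List Int) : Bool := dupCheckLoop PySem.Set.empty array

-- ===== PORT B =====
def dup_check___py_alt (array : List Int) : Bool :=
  decide (((PySem.Set.ofList array).length : Int) ≠ (array.length : Int))

-- ===== PRECONDITION & SPEC =====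
def Spec_dup_check___py (array : List Int) (out : Bool) : Prop := out = dup_check___py_alt array
instance (array : List Int) (out : Bool) : Decidable (Spec_dup_check___py array out) := by unfold Spec_dup_check___py; infer_instance

-- ===== CLAIM (what is proved, stated in full; the proofs are below) =====
def Claim_equal_dup_check___py : Prop := ∀ (array : List Int), Dom_dup_check___py array → Spec_dup_check___py array (dup_check___py array)

-- ===== LEMMAS AND PROOFS =====

theorem contains_iff_mem (s : PySem.Set Int) (i : Int) :
    PySem.Set.contains s i = true ↔ i ∈ s := by
  unfold PySem.Set.contains
  simp

theorem cons_nodup_disjoint (i : Int) (rest : List Int) (s : List Int) (hmem : i ∉ s) :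
    (rest.Nodup ∧ rest.Disjoint (s ++ [i])) ↔ ((i :: rest).Nodup ∧ (i :: rest).Disjoint s) := by
  constructor
  · rintro ⟨hnd, hd⟩
    refine ⟨List.nodup_cons.mpr ⟨?_, hnd⟩, ?_⟩
    · intro hi
      exact hd hi (by simp)
    · intro x hx hxs
      rcases List.mem_cons.mp hx with rfl | hx
      · exact hmem hxs
      · exact hd hx (List.mem_append.mpr (Or.inl hxs))
  · rintro ⟨hnd, hd⟩
    rcases List.nodup_cons.mp hnd with ⟨hir, hndr⟩
    refine ⟨hndr, ?_⟩
    intro x hx hxs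
    rcases List.mem_append.mp hxs with hxs | hxs
    · exact hd (List.mem_cons_of_mem _ hx) hxs
    · simp only [List.mem_singleton] at hxs
      exact hir (hxs ▸ hx)

theorem foldl_add_length_le (l : List Int) (s : PySem.Set Int) :
    (l.foldl PySem.Set.add s).length ≤ s.length + l.length := by
  induction l generalizing s with
  | nil => simp
  | cons i rest ih =>
    simp only [List.foldl_cons, List.length_cons]
    have h := ih (PySem.Set.add s i)
    have hlen : (PySem.Set.add s i).length ≤ s.length + 1 := by
      unfold PySem.Set.add
      split <;> simp
    omega

theorem foldl_add_length_eq_iff (l : List Int) (s : PySem.Set Int) :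
    (l.foldl PySem.Set.add s).length = s.length + l.length ↔ (l.Nodup ∧ l.Disjoint s) := by
  induction l generalizing s with
  | nil => simp
  | cons i rest ih =>
    simp only [List.foldl_cons, List.length_cons]
    by_cases hmem : i ∈ s
    · have hadd : PySem.Set.add s i = s := by
        unfold PySem.Set.add
        rw [if_pos ((contains_iff_mem s i).mpr hmem)]
      rw [hadd]
      constructor
      · intro h
        have := foldl_add_length_le rest s
        omega
      · rintro ⟨_, hd⟩
        exact absurd (hd (List.mem_cons_self) hmem) (by simp)
    · have hadd : PySem.Set.add s i = s ++ [i] := by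
        unfold PySem.Set.add
        rw [if_neg (by simp [contains_iff_mem s i, hmem])]
      rw [hadd]
      have h := ih (s ++ [i])
      simp only [List.length_append, List.length_singleton] at h
      rw [show s.length + (rest.length + 1) = (s.length + 1) + rest.length by omega, h]
      exact cons_nodup_disjoint i rest s hmem

theorem dupCheckLoop_false_iff (l : List Int) (s : PySem.Set Int) :
    dupCheckLoop s l = false ↔ (l.Nodup ∧ l.Disjoint s) := by
  induction l generalizing s with
  | nil => simp [dupCheckLoop]
  | cons i rest ih =>
    unfold dupCheckLoop
    by_cases hmem : i ∈ s
    · rw [if_pos ((contains_iff_mem s i).mpr hmem)]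
      have hneg : ¬ ((i :: rest).Nodup ∧ (i :: rest).Disjoint s) := by
        rintro ⟨_, hd⟩
        exact hd List.mem_cons_self hmem
      exact iff_of_false (by simp) hneg
    · have hadd : PySem.Set.add s i = s ++ [i] := by
        unfold PySem.Set.add
        rw [if_neg (by simp [contains_iff_mem s i, hmem])]
      rw [if_neg (by simp [contains_iff_mem s i, hmem]), hadd, ih]
      exact cons_nodup_disjoint i rest s hmem

-- ===== VERDICT (by name: the statement is the Claim_ definition above) =====
theorem dup_check___py_spec : Claim_equal_dup_check___py := by
  intro array _
  unfold Spec_dup_check___py dup_check___py dup_check___py_alt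
  have hof : PySem.Set.ofList array = array.foldl PySem.Set.add PySem.Set.empty :=
    PySem.Set.ofList_eq_foldl array
  have hkey := foldl_add_length_eq_iff array PySem.Set.empty
  simp only [PySem.Set.empty, List.length_nil, Nat.zero_add] at hkey hof
  rw [hof]
  have hdisj : array.Disjoint ([] : List Int) := by simp
  by_cases hnd : array.Nodup
  · have hfalse : dupCheckLoop PySem.Set.empty array = false :=
      (dupCheckLoop_false_iff array PySem.Set.empty).mpr ⟨hnd, hdisj⟩
    have hlen : (array.foldl PySem.Set.add []).length = array.length := hkey.mpr ⟨hnd, hdisj⟩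
    rw [hfalse, hlen]
    simp
  · have hlen : (array.foldl PySem.Set.add []).length ≠ array.length := by
      intro h
      exact hnd (hkey.mp h).1
    have htrue : dupCheckLoop PySem.Set.empty array = true := by
      cases h : dupCheckLoop PySem.Set.empty array
      · exact absurd ((dupCheckLoop_false_iff array PySem.Set.empty).mp h).1 hnd
      · rfl
    rw [htrue]
    symm
    rw [decide_eq_true_iff]
    intro h
    exact hlen (by exact_mod_cast h)
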